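-- pv_equiv track=rewrite | github.com/aliissa26/pkpdai-web-test | pkcase/predicted.py | check_syns
-- ===== SOURCE A (Python) =====
-- from typing import List, Dict, Union, Tuple
--
-- def check_syns(inp_term: str, replacement_dict: Dict) -> str:
--     for main_form, synonyms in replacement_dict.items():
--         if inp_term in synonyms:
--             return main_form
--         synonyms_changed = [x + "-1" for x in synonyms]
--         main_form_changed = main_form + "-1"
--         if inp_term in synonyms_changed:
--             return main_form_changed
--     return inp_term
-- ===== SOURCE B (Python) =====
-- def check_syns(inp_term: str, replacement_dict: dict) -> str:
--     lookup = {}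
--     for main_form, synonyms in replacement_dict.items():
--         for syn in synonyms:
--             lookup.setdefault(syn, main_form)
--         for syn in synonyms:
--             lookup.setdefault(syn + "-1", main_form + "-1")
--     return lookup.get(inp_term, inp_term)
-- ===== Notes on version B (the rewrite author's own statement) =====
-- stated objective: idiomatic
-- what changed: Replaces A's early-exit scan that rebuilds the '-1'-suffixed synonym list per entry with a one-time first-occurrence lookup table (dict.setdefault in A's priority order) followed by a single lookup.
import Mathlib
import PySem

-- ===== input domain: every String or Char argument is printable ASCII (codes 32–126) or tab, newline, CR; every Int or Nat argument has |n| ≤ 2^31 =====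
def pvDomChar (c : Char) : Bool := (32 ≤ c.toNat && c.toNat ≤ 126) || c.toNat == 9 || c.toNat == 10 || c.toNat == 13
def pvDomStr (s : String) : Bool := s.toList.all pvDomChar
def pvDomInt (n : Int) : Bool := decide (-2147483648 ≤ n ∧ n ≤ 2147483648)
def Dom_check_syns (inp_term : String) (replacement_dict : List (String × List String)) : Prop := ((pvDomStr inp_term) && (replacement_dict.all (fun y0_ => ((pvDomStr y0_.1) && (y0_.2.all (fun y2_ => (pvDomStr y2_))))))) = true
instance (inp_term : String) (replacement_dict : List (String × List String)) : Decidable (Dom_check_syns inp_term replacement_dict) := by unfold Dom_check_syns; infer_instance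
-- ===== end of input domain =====

-- B replaces A's early-exit per-entry scan by building a first-occurrence lookup table once and
-- doing a single dict lookup (idiomatic index-then-lookup shape); return values are identical.

-- ===== PORT A =====
def check_syns (inp_term : String) (replacement_dict : List (String × List String)) : String :=
  match replacement_dict with
  | [] => inp_term
  | (main_form, synonyms) :: rest =>
    if inp_term ∈ synonyms then main_form
    else
      let synonyms_changed := synonyms.map (fun x => x ++ "-1")
      let main_form_changed := main_form ++ "-1"
      if inp_term ∈ synonyms_changed then main_form_changed
      else check_syns inp_term rest

-- ===== PORT B =====
def check_syns_alt (inp_term : String) (replacement_dict : List (String × List String)) : String :=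
  let lookup : PySem.Dict String String :=
    replacement_dict.foldl
      (fun d p =>
        let d1 := p.2.foldl (fun d syn => d.setdefault syn p.1) d
        p.2.foldl (fun d syn => d.setdefault (syn ++ "-1") (p.1 ++ "-1")) d1)
      PySem.Dict.empty
  lookup.getD inp_term inp_term

-- ===== PRECONDITION & SPEC =====
def Spec_check_syns (inp_term : String) (replacement_dict : List (String × List String)) (out : String) : Prop := out = check_syns_alt inp_term replacement_dict
instance (inp_term : String) (replacement_dict : List (String × List String)) (out : String) : Decidable (Spec_check_syns inp_term replacement_dict out) := by unfold Spec_check_syns; infer_instance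

-- ===== CLAIM (what is proved, stated in full; the proofs are below) =====
def Claim_equal_check_syns : Prop := ∀ (inp_term : String) (replacement_dict : List (String × List String)), Dom_check_syns inp_term replacement_dict → Spec_check_syns inp_term replacement_dict (check_syns inp_term replacement_dict)

-- ===== LEMMAS AND PROOFS =====

-- after a chain of setdefaults with a fixed value, lookup is the old entry if present, else hit iff the key occurs
theorem get?_foldl_setdefault (t v : String) (syns : List String) (d : PySem.Dict String String) :
    (syns.foldl (fun d syn => d.setdefault syn v) d).get? t =
      match d.get? t with
      | some w => some w
      | none => if t ∈ syns then some v else none := by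
  induction syns generalizing d with
  | nil => cases hd : d.get? t <;> simp [hd]
  | cons a syns ih =>
    simp only [List.foldl_cons, ih]
    by_cases h : a = t
    · subst h
      rw [PySem.Dict.get?_setdefault_self]
      cases hd : d.get? a <;> simp [hd]
    · rw [PySem.Dict.get?_setdefault_of_ne _ _ (Ne.symm h)]
      cases hd : d.get? t <;> simp [hd, Ne.symm h]

theorem getD_build (t : String) (rd : List (String × List String)) (d : PySem.Dict String String) :
    (rd.foldl
      (fun d p =>
        let d1 := p.2.foldl (fun d syn => d.setdefault syn p.1) d
        p.2.foldl (fun d syn => d.setdefault (syn ++ "-1") (p.1 ++ "-1")) d1) d).getD t t =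
      match d.get? t with
      | some w => w
      | none => check_syns t rd := by
  induction rd generalizing d with
  | nil =>
    simp only [List.foldl_nil, check_syns, PySem.Dict.getD]
    cases hd : d.get? t <;> simp [hd]
  | cons p rd ih =>
    obtain ⟨m, syns⟩ := p
    simp only [List.foldl_cons, ih]
    have h2 : (syns.foldl (fun d syn => d.setdefault (syn ++ "-1") (m ++ "-1"))
        (syns.foldl (fun d syn => d.setdefault syn m) d)).get? t =
        match (syns.foldl (fun d syn => d.setdefault syn m) d).get? t with
        | some w => some w
        | none => if t ∈ syns.map (fun x => x ++ "-1") then some (m ++ "-1") else none := by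
      have h0 := get?_foldl_setdefault t (m ++ "-1") (syns.map (fun x => x ++ "-1"))
        (syns.foldl (fun d syn => d.setdefault syn m) d)
      rw [List.foldl_map] at h0
      exact h0
    rw [h2, get?_foldl_setdefault]
    simp only [check_syns]
    cases hd : d.get? t
    · by_cases h1 : t ∈ syns <;> by_cases hc : t ∈ syns.map (fun x => x ++ "-1") <;>
        simp [h1, hc]
    · by_cases h1 : t ∈ syns <;> simp [h1]

-- ===== VERDICT (by name: the statement is the Claim_ definition above) =====
theorem check_syns_spec : Claim_equal_check_syns := by
  intro inp_term replacement_dict _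
  unfold Spec_check_syns check_syns_alt
  rw [getD_build]
  simp [PySem.Dict.empty, PySem.Dict.get?]
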